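-- pv_equiv track=rewrite | github.com/huikinglam02gmail/Leetcode_solutions | 2453.destroy-sequential-targets.py | destroyTargets
-- ===== SOURCE A (Python) =====
-- from typing import List
--
-- def destroyTargets(nums: List[int], space: int) -> int:
--     hashTable = {}
--     for i in range(len(nums)):
--         if nums[i] % space not in hashTable: hashTable[nums[i] % space] = [0, float("inf")]
--         hashTable[nums[i] % space][0] += 1
--         hashTable[nums[i] % space][1] = min(hashTable[nums[i] % space][1], nums[i])
--
--     maxCount = 0
--     result = float("inf")
--     for count, smallest in hashTable.values():
--         if count > maxCount:
--             maxCount = count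
--             result = smallest
--         elif count == maxCount and smallest < result:
--             result = smallest
--     return result
-- ===== SOURCE B (Python) =====
-- def destroyTargets(nums, space):
--     counts = {}
--     for n in nums:
--         r = n % space
--         counts[r] = counts.get(r, 0) + 1
--     maxCount = max(counts.values(), default=0)
--     return min((n for n in nums if counts[n % space] == maxCount), default=float('inf'))
-- ===== Notes on version B (the rewrite author's own statement) =====
-- stated objective: simpler
-- what changed: B replaces A's combined count-plus-group-minimum dict and the scan over (count, smallest) pairs by a plain frequency count followed by a filtered min over nums itself, dropping the per-group minimum bookkeeping.
-- outside the precondition, e.g. on destroyTargets([], 5): A returns inf, B returns inf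
import Mathlib
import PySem

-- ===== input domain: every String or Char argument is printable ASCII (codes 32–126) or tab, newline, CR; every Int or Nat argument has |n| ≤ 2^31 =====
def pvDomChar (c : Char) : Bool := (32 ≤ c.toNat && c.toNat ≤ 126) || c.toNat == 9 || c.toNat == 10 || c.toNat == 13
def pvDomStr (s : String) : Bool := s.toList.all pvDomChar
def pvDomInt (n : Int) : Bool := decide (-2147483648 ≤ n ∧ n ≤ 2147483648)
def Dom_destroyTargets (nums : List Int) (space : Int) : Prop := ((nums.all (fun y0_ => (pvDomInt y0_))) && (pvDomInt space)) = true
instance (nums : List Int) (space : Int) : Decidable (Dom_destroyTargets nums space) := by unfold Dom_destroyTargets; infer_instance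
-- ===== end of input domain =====

-- B replaces A's combined count+group-minimum dict and pair scan by a plain frequency count
-- followed by a filtered min over nums itself (objective: simpler).

-- ===== PORT A =====
-- Python's float("inf") seed of the per-group minimum is modelled as `none` (= +inf);
-- min(inf, n) = n is `ominA`; this is exact for every int n.
def ominA (o : Option Int) (n : Int) : Option Int :=
  match o with
  | none => some n
  | some m => some (min m n)

-- smallest < result, with none = +inf
def ltOptA (a b : Option Int) : Bool :=
  match a, b with
  | none, _ => false
  | some _, none => true
  | some x, some y => decide (x < y)

-- loop body of A's first loop (the three statements on hashTable)
def stepA (space : Int) (d : PySem.Dict Int (Int × Option Int)) (n : Int) :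
    PySem.Dict Int (Int × Option Int) :=
  let k := PySem.Int.mod n space
  let d := if d.contains k then d else d.insert k (0, none)
  let d := d.modify k (0, none) (fun cv => (cv.1 + 1, cv.2))
  d.modify k (0, none) (fun cv => (cv.1, ominA cv.2 n))

-- loop body of A's second loop over hashTable.values()
def scanStepA (st : Int × Option Int) (p : Int × Option Int) : Int × Option Int :=
  if p.1 > st.1 then (p.1, p.2)
  else if p.1 == st.1 && ltOptA p.2 st.2 then (st.1, p.2)
  else st

def destroyTargets (nums : List Int) (space : Int) : Int :=
  let table := (PySem.List.pyRange 0 (nums.length : Int) 1).foldl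
      (fun d i => stepA space d (PySem.List.pyGetD nums i 0)) PySem.Dict.empty
  let res := table.values.foldl scanStepA (0, none)
  res.2.getD 0   -- res.2 = none (Python: float("inf")) only for nums = [], excluded by Pre_

-- ===== PORT B =====
def destroyTargets_alt (nums : List Int) (space : Int) : Int :=
  let counts : PySem.Dict Int Int := nums.foldl
      (fun d n => d.insert (PySem.Int.mod n space) (d.getD (PySem.Int.mod n space) 0 + 1))
      PySem.Dict.empty
  let maxCount := (PySem.List.max? counts.values (fun v => v)).getD 0
  (PySem.List.min? (nums.filter (fun n => counts.getD (PySem.Int.mod n space) 0 == maxCount))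
      (fun v => v)).getD 0   -- none (Python: default float("inf")) only for nums = [], excluded by Pre_

-- ===== PRECONDITION & SPEC =====
-- Pre_ excludes space = 0 (A raises ZeroDivisionError) and nums = [] (A returns
-- float("inf"), which is not a value of the declared int return type).
def Pre_destroyTargets (nums : List Int) (space : Int) : Prop := nums ≠ [] ∧ space ≠ 0
instance (nums : List Int) (space : Int) : Decidable (Pre_destroyTargets nums space) := by
  unfold Pre_destroyTargets; infer_instance

def pvWitness_destroyTargets : List Int × Int := ([1, 3, 5, 2, 4, 6], 2)

def Spec_destroyTargets (nums : List Int) (space : Int) (out : Int) : Prop :=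
  out = destroyTargets_alt nums space
instance (nums : List Int) (space : Int) (out : Int) : Decidable (Spec_destroyTargets nums space out) := by
  unfold Spec_destroyTargets; infer_instance

-- ===== CLAIM (what is proved, stated in full; the proofs are below) =====
def Claim_equal_destroyTargets : Prop := ∀ (nums : List Int) (space : Int),
  Dom_destroyTargets nums space → Pre_destroyTargets nums space →
  Spec_destroyTargets nums space (destroyTargets nums space)

-- ===== LEMMAS AND PROOFS =====

-- min with none = +infinity, on two options
def ominO (a b : Option Int) : Option Int :=
  match a, b with
  | none, b => b
  | a, none => a
  | some x, some y => some (min x y)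

-- the group of nums with remainder k, its size and its running minimum
def flG (nums : List Int) (space : Int) (k : Int) : List Int :=
  nums.filter (fun n => PySem.Int.mod n space == k)
def cntG (nums : List Int) (space : Int) (k : Int) : Int := ((flG nums space k).length : Int)
def mflG (nums : List Int) (space : Int) (k : Int) : Option Int :=
  (flG nums space k).foldl ominA none
def KG (nums : List Int) (space : Int) : List Int :=
  PySem.Set.ofList (nums.map (fun n => PySem.Int.mod n space))

lemma stepA_getD (space : Int) (d : PySem.Dict Int (Int × Option Int)) (n k : Int) :
    (stepA space d n).getD k (0, none) =
      if k = PySem.Int.mod n space then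
        ((d.getD k (0, none)).1 + 1, ominA (d.getD k (0, none)).2 n)
      else d.getD k (0, none) := by
  unfold stepA
  by_cases hc : d.contains (PySem.Int.mod n space)
  · simp only [hc, if_true, PySem.Dict.getD_modify]
    by_cases hk : k = PySem.Int.mod n space <;> simp [hk]
  · have hc' : d.contains (PySem.Int.mod n space) = false := by simpa using hc
    have h0 : d.getD (PySem.Int.mod n space) ((0 : Int), (none : Option Int)) = (0, none) :=
      PySem.Dict.getD_of_not_contains d _ hc'
    simp only [hc, if_false, Bool.false_eq_true, PySem.Dict.getD_modify, PySem.Dict.getD_insert]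
    by_cases hk : k = PySem.Int.mod n space <;> simp [hk, h0]

lemma foldA_getD (space : Int) : ∀ (l : List Int) (d : PySem.Dict Int (Int × Option Int)) (k : Int),
    (l.foldl (stepA space) d).getD k (0, none) =
      (l.filter (fun n => PySem.Int.mod n space == k)).foldl
        (fun p n => (p.1 + 1, ominA p.2 n)) (d.getD k (0, none))
  | [], d, k => rfl
  | n :: l, d, k => by
    simp only [List.foldl_cons, List.filter_cons]
    rw [foldA_getD space l]
    by_cases h : PySem.Int.mod n space = k
    · simp [h, stepA_getD]
    · simp [h, stepA_getD, Ne.symm h]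

lemma keys_modify_of_contains (d : PySem.Dict Int (Int × Option Int)) (k : Int)
    (d0 : Int × Option Int) (f : Int × Option Int → Int × Option Int)
    (h : d.contains k = true) : (d.modify k d0 f).keys = d.keys := by
  rw [PySem.Dict.keys_modify, PySem.Dict.keys_insert_of_contains]
  exact h

lemma stepA_keys (space : Int) (d : PySem.Dict Int (Int × Option Int)) (n : Int) :
    (stepA space d n).keys = PySem.Set.add d.keys (PySem.Int.mod n space) := by
  unfold stepA
  by_cases hc : d.contains (PySem.Int.mod n space)
  · have h1 := keys_modify_of_contains d (PySem.Int.mod n space) (0, none)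
      (fun cv => (cv.1 + 1, cv.2)) hc
    have hc2 : (d.modify (PySem.Int.mod n space) (0, none) (fun cv => (cv.1 + 1, cv.2))).contains
        (PySem.Int.mod n space) = true := by
      rw [PySem.Dict.contains_iff_mem_keys, h1]
      exact (PySem.Dict.contains_iff_mem_keys _ _).mp hc
    simp only [hc, if_true]
    rw [keys_modify_of_contains _ _ _ _ hc2, h1,
      PySem.Set.add_of_mem ((PySem.Dict.contains_iff_mem_keys _ _).mp hc)]
  · have hc' : d.contains (PySem.Int.mod n space) = false := by simpa using hc
    have hk1 : (d.insert (PySem.Int.mod n space) ((0 : Int), (none : Option Int))).keys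
        = d.keys ++ [PySem.Int.mod n space] :=
      PySem.Dict.keys_insert_of_not_contains d _ hc'
    have hc1 : (d.insert (PySem.Int.mod n space) ((0 : Int), (none : Option Int))).contains
        (PySem.Int.mod n space) = true := PySem.Dict.contains_insert_self d _ _
    have h1 := keys_modify_of_contains (d.insert (PySem.Int.mod n space) (0, none))
      (PySem.Int.mod n space) (0, none) (fun cv => (cv.1 + 1, cv.2)) hc1
    have hc2 : ((d.insert (PySem.Int.mod n space) ((0 : Int), (none : Option Int))).modify
        (PySem.Int.mod n space) (0, none) (fun cv => (cv.1 + 1, cv.2))).contains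
        (PySem.Int.mod n space) = true := by
      rw [PySem.Dict.contains_iff_mem_keys, h1]
      exact (PySem.Dict.contains_iff_mem_keys _ _).mp hc1
    simp only [hc, if_false, Bool.false_eq_true]
    rw [keys_modify_of_contains _ _ _ _ hc2, h1, hk1,
      PySem.Set.add_of_not_mem (fun hm => by
        have := (PySem.Dict.contains_iff_mem_keys d (PySem.Int.mod n space)).mpr hm
        rw [hc'] at this; exact Bool.false_ne_true this)]

lemma foldA_keys (space : Int) : ∀ (l : List Int) (d : PySem.Dict Int (Int × Option Int)),
    (l.foldl (stepA space) d).keys =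
      PySem.Set.update d.keys (l.map (fun n => PySem.Int.mod n space))
  | [], d => by simp [PySem.Set.update_nil]
  | n :: l, d => by
    simp only [List.foldl_cons, List.map_cons, PySem.Set.update_cons]
    rw [foldA_keys space l, stepA_keys]

lemma foldl_add_one {α : Type} : ∀ (l : List α) (c : Int),
    l.foldl (fun c _ => c + 1) c = c + (l.length : Int)
  | [], c => by simp
  | _ :: l, c => by
    rw [List.foldl_cons, foldl_add_one l]
    simp only [List.length_cons]
    push_cast
    ring

lemma foldl_pair_cnt_min : ∀ (l : List Int) (c : Int) (o : Option Int),
    l.foldl (fun (p : Int × Option Int) n => (p.1 + 1, ominA p.2 n)) (c, o)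
      = (l.foldl (fun c _ => c + 1) c, l.foldl ominA o)
  | [], _, _ => rfl
  | n :: l, c, o => by
    rw [List.foldl_cons, List.foldl_cons, List.foldl_cons]
    exact foldl_pair_cnt_min l (c + 1) (ominA o n)

lemma foldl_ominA_some : ∀ (l : List Int) (a : Int), l.foldl ominA (some a) = some (l.foldl min a)
  | [], a => rfl
  | n :: l, a => by
    rw [List.foldl_cons, List.foldl_cons]
    exact foldl_ominA_some l (min a n)

lemma foldl_ominA_none (l : List Int) :
    l.foldl ominA none = PySem.List.min? l (fun v => v) := by
  cases l with
  | nil => rfl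
  | cons x t =>
    rw [List.foldl_cons, PySem.List.min?_id_cons]
    exact foldl_ominA_some t x

lemma scanStepA_eq (mc : Int) (res : Option Int) (p : Int × Option Int) :
    scanStepA (mc, res) p =
      (max mc p.1,
        if mc < p.1 then p.2 else if p.1 = mc then ominO res p.2 else res) := by
  rcases p with ⟨c, s⟩
  unfold scanStepA
  dsimp only
  by_cases h1 : c > mc
  · have : max mc c = c := by omega
    simp [h1, this]
  · have hmax : max mc c = mc := by omega
    have hlt : ¬ mc < c := h1
    by_cases h2 : c = mc
    · subst h2
      cases s with
      | none =>
        cases res <;> simp [ltOptA, ominO]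
      | some x =>
        cases res with
        | none => simp [ltOptA, ominO]
        | some y =>
          by_cases hxy : x < y <;>
            simp [ltOptA, ominO, hxy, min_def]
    · simp [hmax, hlt, fun h => h2 h]

lemma scanA_spec : ∀ (L : List (Int × Option Int)) (mc : Int) (res : Option Int) (F : Int),
    F = L.foldl (fun a p => max a p.1) mc →
    L.foldl scanStepA (mc, res) =
      (F, ((L.filter (fun p => p.1 == F)).map Prod.snd).foldl ominO
            (if mc = F then res else none))
  | [], mc, res, F, hF => by
    simp only [List.foldl_nil] at hF
    simp [hF]
  | p :: T, mc, res, F, hF => by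
    have hF' : F = T.foldl (fun a p => max a p.1) (max mc p.1) := by
      rw [hF, List.foldl_cons]
    have hmc_le : max mc p.1 ≤ F := by
      rw [hF']
      exact (PySem.List.le_foldl_max_int T Prod.fst (max mc p.1)).1
    rw [List.foldl_cons, scanStepA_eq, scanA_spec T (max mc p.1) _ F hF']
    simp only [List.filter_cons]
    by_cases hp : p.1 = F
    · have hpb : (p.1 == F) = true := by simp [hp]
      rw [hpb]
      simp only [if_true, List.map_cons, List.foldl_cons]
      congr 1
      by_cases hmceq : mc = F
      · have hmax : max mc p.1 = F := by omega
        have hlt : ¬ mc < p.1 := by omega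
        simp [hp, hmceq]
      · have hlt : mc < p.1 := by omega
        have hmax : max mc p.1 = F := by omega
        simp only [hmax, if_pos hlt, if_neg hmceq]
        cases p.2 <;> rfl
    · have hpb : (p.1 == F) = false := by simp [hp]
      rw [hpb]
      simp only [Bool.false_eq_true, if_false]
      congr 1
      have hple : p.1 ≤ F := le_trans (le_max_right mc p.1) hmc_le
      by_cases hmceq : mc = F
      · subst hmceq
        rw [if_pos (show max mc p.1 = mc by omega), if_neg (show ¬ mc < p.1 by omega),
          if_neg hp, if_pos rfl]
      · have hmax : ¬ (max mc p.1 = F) := by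
          intro h
          rcases max_choice mc p.1 with h' | h' <;> omega
        simp [hmax, hmceq]

lemma ominO_cases (a b : Option Int) (m : Int) (h : ominO a b = some m) :
    (a = some m ∨ b = some m) ∧ (∀ x, a = some x → m ≤ x) ∧ (∀ x, b = some x → m ≤ x) := by
  cases a with
  | none =>
    cases b with
    | none => simp [ominO] at h
    | some y =>
      simp [ominO] at h
      subst h
      exact ⟨Or.inr rfl, by simp, by intro x hx; simp at hx; omega⟩
  | some x =>
    cases b with
    | none =>
      simp [ominO] at h
      subst h
      exact ⟨Or.inl rfl, by intro z hz; simp at hz; omega, by simp⟩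
    | some y =>
      simp [ominO] at h
      constructor
      · rcases min_choice x y with h' | h' <;> [left; right] <;> rw [← h, h']
      · refine ⟨fun z hz => ?_, fun z hz => ?_⟩ <;> simp at hz <;> subst hz <;>
          [exact h ▸ min_le_left x y; exact h ▸ min_le_right x y]

lemma ominO_fold_le : ∀ (l : List (Option Int)) (acc : Option Int) (m : Int),
    l.foldl ominO acc = some m →
    (∀ x, acc = some x → m ≤ x) ∧ (∀ o ∈ l, ∀ x, o = some x → m ≤ x)
  | [], acc, m, h => by
    simp only [List.foldl_nil] at h
    exact ⟨fun x hx => by rw [h] at hx; simp at hx; omega, by simp⟩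
  | o :: t, acc, m, h => by
    rw [List.foldl_cons] at h
    obtain ⟨h1, h2⟩ := ominO_fold_le t (ominO acc o) m h
    have hstep : ∀ (a b : Option Int) (x : Int), (a = some x ∨ b = some x) →
        ∀ y, ominO a b = some y → y ≤ x := by
      intro a b x hab y hy
      obtain ⟨_, ha, hb⟩ := ominO_cases a b y hy
      rcases hab with h' | h'
      · exact ha x h'
      · exact hb x h'
    constructor
    · intro x hx
      cases hacc : ominO acc o with
      | none =>
        rw [hx] at hacc
        cases o <;> simp [ominO] at hacc
      | some y =>
        have hy := h1 y hacc
        exact le_trans hy (hstep acc o x (Or.inl hx) y hacc)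
    · intro o' ho' x hx
      rcases List.mem_cons.mp ho' with rfl | hmem
      · cases hacc : ominO acc o' with
        | none =>
          rw [hx] at hacc
          cases acc <;> simp [ominO] at hacc
        | some y =>
          exact le_trans (h1 y hacc) (hstep acc o' x (Or.inr hx) y hacc)
      · exact h2 o' hmem x hx

lemma ominO_fold_mem : ∀ (l : List (Option Int)) (acc : Option Int) (m : Int),
    l.foldl ominO acc = some m → acc = some m ∨ ∃ o ∈ l, o = some m
  | [], acc, m, h => by
    simp only [List.foldl_nil] at h
    exact Or.inl h
  | o :: t, acc, m, h => by
    rw [List.foldl_cons] at h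
    rcases ominO_fold_mem t (ominO acc o) m h with h' | ⟨o', ho', ho''⟩
    · rcases (ominO_cases acc o m h').1 with h'' | h''
      · exact Or.inl h''
      · exact Or.inr ⟨o, List.mem_cons_self, h''⟩
    · exact Or.inr ⟨o', List.mem_cons_of_mem _ ho', ho''⟩

lemma ominO_isSome_left (a b : Option Int) (h : a.isSome) : (ominO a b).isSome := by
  cases a <;> cases b <;> simp_all [ominO]

lemma ominO_isSome_right (a b : Option Int) (h : b.isSome) : (ominO a b).isSome := by
  cases a <;> cases b <;> simp_all [ominO]

lemma ominO_fold_isSome : ∀ (l : List (Option Int)) (acc : Option Int),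
    acc.isSome → (l.foldl ominO acc).isSome
  | [], acc, h => h
  | o :: t, acc, h => by
    rw [List.foldl_cons]
    exact ominO_fold_isSome t _ (ominO_isSome_left acc o h)

lemma ominO_fold_isSome_mem : ∀ (l : List (Option Int)) (acc o : Option Int),
    o ∈ l → o.isSome → (l.foldl ominO acc).isSome
  | [], acc, o, ho, _ => by simp at ho
  | o' :: t, acc, o, ho, hs => by
    rw [List.foldl_cons]
    rcases List.mem_cons.mp ho with rfl | hmem
    · exact ominO_fold_isSome t _ (ominO_isSome_right acc o hs)
    · exact ominO_fold_isSome_mem t _ o hmem hs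

lemma min?_eq_some_of (xs : List Int) (m : Int) (hm : m ∈ xs) (hmin : ∀ y ∈ xs, m ≤ y) :
    PySem.List.min? xs (fun v => v) = some m := by
  cases hx : PySem.List.min? xs (fun v => v) with
  | none =>
    rw [PySem.List.min?_eq_none_iff] at hx
    subst hx
    simp at hm
  | some m' =>
    have h1 : m' ∈ xs := PySem.List.min?_mem hx
    have h2 : m' ≤ m := PySem.List.min?_isMin hx m hm
    have h3 : m ≤ m' := hmin m' h1
    rw [le_antisymm h2 h3]

lemma count_rems_eq_cntG (nums : List Int) (space k : Int) :
    (((nums.map (fun n => PySem.Int.mod n space)).count k : Nat) : Int) = cntG nums space k := by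
  unfold cntG flG
  rw [List.count_eq_countP, List.countP_map, List.countP_eq_length_filter]
  rfl

lemma mem_KG_iff (nums : List Int) (space k : Int) :
    k ∈ KG nums space ↔ ∃ n ∈ nums, PySem.Int.mod n space = k := by
  unfold KG
  rw [PySem.Set.mem_ofList]
  simp [List.mem_map]

lemma flG_ne_nil_of_mem_KG (nums : List Int) (space : Int) {k : Int} (hk : k ∈ KG nums space) :
    flG nums space k ≠ [] := by
  obtain ⟨n, hn, hr⟩ := (mem_KG_iff nums space k).mp hk
  exact List.ne_nil_of_mem (List.mem_filter.mpr ⟨hn, by simp [hr]⟩)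

lemma cntG_pos_of_mem_KG (nums : List Int) (space : Int) {k : Int} (hk : k ∈ KG nums space) :
    1 ≤ cntG nums space k := by
  have h := flG_ne_nil_of_mem_KG nums space hk
  unfold cntG
  have : 0 < (flG nums space k).length := List.length_pos_of_ne_nil h
  omega

lemma main_eq (nums : List Int) (space : Int) (hne : nums ≠ []) :
    destroyTargets nums space = destroyTargets_alt nums space := by
  -- notation
  have hT := PySem.List.foldl_pyRange_zero_pyGetD' nums 0 (stepA space) PySem.Dict.empty
  -- the A-side table
  set T := nums.foldl (stepA space) PySem.Dict.empty with hTdef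
  have hkeys : T.keys = KG nums space := by
    rw [hTdef, foldA_keys]
    rw [PySem.Dict.keys_empty, PySem.Set.update_nil_left]
    rfl
  have hnodup : T.keys.Nodup := by
    rw [hkeys]; exact PySem.Set.nodup_ofList _
  have hgetD : ∀ k, T.getD k (0, none) = (cntG nums space k, mflG nums space k) := by
    intro k
    rw [hTdef, foldA_getD, PySem.Dict.getD_empty, foldl_pair_cnt_min, foldl_add_one]
    unfold cntG mflG flG
    simp
  have hvals : T.values = (KG nums space).map
      (fun k => (cntG nums space k, mflG nums space k)) := by
    rw [PySem.Dict.values_eq_map_keys T hnodup (0, none), hkeys]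
    exact List.map_congr_left fun k _ => hgetD k
  -- the maximal group size
  set F := (KG nums space).foldl (fun a k => max a (cntG nums space k)) 0 with hFdef
  have hKne : KG nums space ≠ [] := by
    obtain ⟨n0, rest, hnums⟩ := List.exists_cons_of_ne_nil hne
    refine List.ne_nil_of_mem ((mem_KG_iff nums space _).mpr ⟨n0, ?_, rfl⟩)
    rw [hnums]; exact List.mem_cons_self
  obtain ⟨k0, K', hK0⟩ := List.exists_cons_of_ne_nil hKne
  have hk0K : k0 ∈ KG nums space := by rw [hK0]; exact List.mem_cons_self
  have hF_ge : ∀ k ∈ KG nums space, cntG nums space k ≤ F :=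
    (PySem.List.le_foldl_max_int (KG nums space) (cntG nums space) 0).2
  have hF1 : 1 ≤ F := le_trans (cntG_pos_of_mem_KG nums space hk0K) (hF_ge k0 hk0K)
  -- the A-side scan
  have hFval : F = T.values.foldl (fun a p => max a p.1) 0 := by
    rw [hvals, List.foldl_map]
  have hscan := scanA_spec T.values 0 none F hFval
  -- compute A's result
  have hfilt : (T.values.filter (fun p => p.1 == F)).map Prod.snd
      = ((KG nums space).filter (fun k => cntG nums space k == F)).map (mflG nums space) := by
    rw [hvals, List.filter_map, List.map_map]
    rfl
  have hA : destroyTargets nums space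
      = ((((KG nums space).filter (fun k => cntG nums space k == F)).map
          (mflG nums space)).foldl ominO none).getD 0 := by
    unfold destroyTargets
    dsimp only
    rw [hT, hscan, hfilt]
    simp
  -- the B-side dict is the counter of the remainders
  have hcnts : nums.foldl
      (fun d n => d.insert (PySem.Int.mod n space) (d.getD (PySem.Int.mod n space) 0 + 1))
      PySem.Dict.empty = PySem.Dict.counter (nums.map (fun n => PySem.Int.mod n space)) := by
    rw [← PySem.Dict.foldl_insert_getD_add_one_eq_counter, List.foldl_map]
  have hv2 : (PySem.Dict.counter (nums.map (fun n => PySem.Int.mod n space))).values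
      = (KG nums space).map (cntG nums space) := by
    rw [PySem.Dict.values_eq_map_keys _ (PySem.Dict.nodup_keys_counter _) 0,
      PySem.Dict.keys_counter]
    exact List.map_congr_left fun k _ => by
      rw [PySem.Dict.getD_counter]
      exact count_rems_eq_cntG nums space k
  have hmax : (PySem.List.max? ((KG nums space).map (cntG nums space)) (fun v => v)).getD 0
      = F := by
    rw [hK0, List.map_cons, PySem.List.max?_id_cons]
    have h0 : max 0 (cntG nums space k0) = cntG nums space k0 := by
      have := cntG_pos_of_mem_KG nums space hk0K
      omega
    rw [hFdef, hK0, List.foldl_cons, ← List.foldl_map (f := cntG nums space) (g := max), h0]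
    rfl
  have hB : destroyTargets_alt nums space
      = (PySem.List.min? (nums.filter (fun n => cntG nums space (PySem.Int.mod n space) == F))
          (fun v => v)).getD 0 := by
    unfold destroyTargets_alt
    dsimp only
    rw [hcnts, hv2, hmax]
    congr 2
    apply List.filter_congr
    intro n _
    rw [PySem.Dict.getD_counter, count_rems_eq_cntG]
  -- the two results are the same minimum
  set Sl := (KG nums space).filter (fun k => cntG nums space k == F) with hSl
  set NB := nums.filter (fun n => cntG nums space (PySem.Int.mod n space) == F) with hNB
  have hmfl_min : ∀ k, mflG nums space k = PySem.List.min? (flG nums space k) (fun v => v) :=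
    fun k => foldl_ominA_none _
  -- F is attained
  have hattain : ∃ k ∈ KG nums space, cntG nums space k = F := by
    have hFmem := PySem.List.foldl_max_mem ((KG nums space).map (cntG nums space)) 0
    rw [List.foldl_map, ← hFdef] at hFmem
    rcases hFmem with h | h
    · omega
    · obtain ⟨k, hk, hck⟩ := List.mem_map.mp h
      exact ⟨k, hk, hck⟩
  obtain ⟨ka, hkaK, hkaF⟩ := hattain
  have hkaSl : ka ∈ Sl := by
    rw [hSl]
    exact List.mem_filter.mpr ⟨hkaK, by simp [hkaF]⟩
  have hmfl_some : ∀ k ∈ KG nums space, (mflG nums space k).isSome := by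
    intro k hk
    rw [hmfl_min k]
    cases hx : PySem.List.min? (flG nums space k) (fun v => v) with
    | none => exact absurd ((PySem.List.min?_eq_none_iff _ _).mp hx) (flG_ne_nil_of_mem_KG nums space hk)
    | some _ => rfl
  -- the A-side fold returns some m
  have hLsome : ((Sl.map (mflG nums space)).foldl ominO none).isSome := by
    refine ominO_fold_isSome_mem _ none (mflG nums space ka) (List.mem_map_of_mem hkaSl) ?_
    exact hmfl_some ka hkaK
  obtain ⟨m, hm⟩ := Option.isSome_iff_exists.mp hLsome
  -- m is a member of NB
  have hmNB : m ∈ NB := by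
    rcases ominO_fold_mem _ _ _ hm with h | ⟨o, ho, ho'⟩
    · simp at h
    · obtain ⟨k, hkSl, hko⟩ := List.mem_map.mp ho
      have hkK : k ∈ KG nums space := (List.mem_filter.mp (hSl ▸ hkSl)).1
      have hkF : cntG nums space k = F := by
        have := (List.mem_filter.mp (hSl ▸ hkSl)).2
        simpa using this
      have hmfl : PySem.List.min? (flG nums space k) (fun v => v) = some m := by
        rw [← hmfl_min, hko, ho']
      have hmem := PySem.List.min?_mem hmfl
      have hmem' := List.mem_filter.mp hmem
      have hrk : PySem.Int.mod m space = k := by simpa using hmem'.2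
      rw [hNB]
      exact List.mem_filter.mpr ⟨hmem'.1, by simp [hrk, hkF]⟩
  -- m is a lower bound of NB
  have hmLB : ∀ y ∈ NB, m ≤ y := by
    intro y hy
    have hy' := List.mem_filter.mp (hNB ▸ hy)
    have hyF : cntG nums space (PySem.Int.mod y space) = F := by simpa using hy'.2
    have hkK : PySem.Int.mod y space ∈ KG nums space :=
      (mem_KG_iff nums space _).mpr ⟨y, hy'.1, rfl⟩
    have hkSl : PySem.Int.mod y space ∈ Sl := by
      rw [hSl]
      exact List.mem_filter.mpr ⟨hkK, by simp [hyF]⟩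
    obtain ⟨v, hv⟩ := Option.isSome_iff_exists.mp (hmfl_some _ hkK)
    have hvy : v ≤ y := by
      have hminv : PySem.List.min? (flG nums space (PySem.Int.mod y space)) (fun v => v) = some v := by
        rw [← hmfl_min, hv]
      have hyfl : y ∈ flG nums space (PySem.Int.mod y space) :=
        List.mem_filter.mpr ⟨hy'.1, by simp⟩
      exact PySem.List.min?_isMin hminv y hyfl
    have hmv : m ≤ v := by
      have := (ominO_fold_le _ _ _ hm).2 (mflG nums space (PySem.Int.mod y space))
        (List.mem_map_of_mem hkSl) v hv
      exact this
    exact le_trans hmv hvy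
  -- conclude
  have hBmin : PySem.List.min? NB (fun v => v) = some m := min?_eq_some_of NB m hmNB hmLB
  rw [hA, hB, hm, hBmin]

-- ===== VERDICT (by name: the statement is the Claim_ definition above) =====
theorem destroyTargets_spec : Claim_equal_destroyTargets := by
  unfold Claim_equal_destroyTargets
  intro nums space _hdom hpre
  unfold Spec_destroyTargets
  exact main_eq nums space hpre.1
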